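-- pv_equiv track=rewrite | github.com/lion1206/--------------- | 1.3/playfer.py | split_into_bigrams
-- ===== SOURCE A (Python) =====
-- def split_into_bigrams(text):
--     result = []
--     i = 0
--     while i < len(text):
--         if i == len(text) - 1:
--             result.append(text[i] + 'Ф')
--             break
--         elif text[i] == text[i + 1]:
--             result.append(text[i] + 'Ф')
--             i += 1
--         else:
--             result.append(text[i:i+2])
--             i += 2
--     return result
-- ===== SOURCE B (Python) =====
-- def split_into_bigrams(text):
--     result = []
--     pending = ''
--     for c in text:
--         if not pending:
--             pending = c
--         elif pending == c:
--             result.append(pending + 'Ф')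
--             pending = c
--         else:
--             result.append(pending + c)
--             pending = ''
--     if pending:
--         result.append(pending + 'Ф')
--     return result
-- ===== Notes on version B (the rewrite author's own statement) =====
-- stated objective: simpler
-- what changed: Replaced the index-based while loop (with slicing and an explicit last-index check) by a single for-loop over the characters carrying a pending-character slot, flushed with the padding letter at the end.
import Mathlib
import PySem

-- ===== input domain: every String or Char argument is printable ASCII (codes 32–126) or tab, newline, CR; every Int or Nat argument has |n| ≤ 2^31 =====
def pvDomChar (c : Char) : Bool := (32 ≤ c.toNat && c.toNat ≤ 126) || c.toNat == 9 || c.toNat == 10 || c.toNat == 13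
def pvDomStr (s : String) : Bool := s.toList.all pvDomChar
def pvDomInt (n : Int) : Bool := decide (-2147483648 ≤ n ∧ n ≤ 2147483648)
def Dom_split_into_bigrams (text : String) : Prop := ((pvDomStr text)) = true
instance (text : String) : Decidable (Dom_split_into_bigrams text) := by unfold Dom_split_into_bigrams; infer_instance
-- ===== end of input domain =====

-- B replaces A's index-driven while loop by one pass with a pending-character slot (objective: simpler).

-- ===== PORT A =====
-- A's while loop over the index i; text[i] is always in range at the use sites, rendered with getD.
def pvALoop (s : List Char) (i : Nat) : List String :=
  if i < s.length then
    if i = s.length - 1 then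
      [String.ofList [s.getD i ' ', 'Ф']]
    else if s.getD i ' ' = s.getD (i+1) ' ' then
      String.ofList [s.getD i ' ', 'Ф'] :: pvALoop s (i+1)
    else
      String.ofList [s.getD i ' ', s.getD (i+1) ' '] :: pvALoop s (i+2)
  else []
termination_by s.length - i

def split_into_bigrams (text : String) : List String := pvALoop text.toList 0

-- ===== PORT B =====
-- B's for-loop carrying the pending slot ('' = none), then the final flush.
def pvBLoop (s : List Char) (pending : Option Char) : List String :=
  match s, pending with
  | [], none => []
  | [], some p => [String.ofList [p, 'Ф']]
  | c :: rest, none => pvBLoop rest (some c)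
  | c :: rest, some p =>
      if p = c then String.ofList [p, 'Ф'] :: pvBLoop rest (some c)
      else String.ofList [p, c] :: pvBLoop rest none

def split_into_bigrams_alt (text : String) : List String := pvBLoop text.toList none

-- ===== PRECONDITION & SPEC =====
def Spec_split_into_bigrams (text : String) (out : List String) : Prop := out = split_into_bigrams_alt text
instance (text : String) (out : List String) : Decidable (Spec_split_into_bigrams text out) := by unfold Spec_split_into_bigrams; infer_instance

-- ===== CLAIM (what is proved, stated in full; the proofs are below) =====
def Claim_equal_split_into_bigrams : Prop := ∀ (text : String), Dom_split_into_bigrams text → Spec_split_into_bigrams text (split_into_bigrams text)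

-- ===== LEMMAS AND PROOFS =====

theorem pvALoop_eq_pvBLoop_drop (s : List Char) (i : Nat) :
    pvALoop s i = pvBLoop (s.drop i) none := by
  by_cases h : i < s.length
  · have hdrop : s.drop i = s[i] :: s.drop (i+1) := List.drop_eq_getElem_cons h
    have gi : s.getD i ' ' = s[i] := List.getD_eq_getElem s ' ' h
    by_cases hlast : i = s.length - 1
    · have h1 : s.drop (i+1) = [] := by
        apply List.drop_eq_nil_of_le; omega
      rw [pvALoop, if_pos h, if_pos hlast, hdrop, h1, gi]
      simp [pvBLoop]
    · have h1 : i + 1 < s.length := by omega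
      have gi1 : s.getD (i+1) ' ' = s[i+1] := List.getD_eq_getElem s ' ' h1
      have hdrop1 : s.drop (i+1) = s[i+1] :: s.drop (i+2) := List.drop_eq_getElem_cons h1
      have ih1 : pvALoop s (i+1) = pvBLoop (s.drop (i+1)) none := pvALoop_eq_pvBLoop_drop s (i+1)
      have ih2 : pvALoop s (i+2) = pvBLoop (s.drop (i+2)) none := pvALoop_eq_pvBLoop_drop s (i+2)
      rw [pvALoop, if_pos h, if_neg hlast, gi, gi1, hdrop, hdrop1]
      by_cases heq : s[i] = s[i+1]
      · rw [if_pos heq, ih1, hdrop1]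
        simp [pvBLoop, heq]
      · rw [if_neg heq, ih2]
        simp [pvBLoop, heq]
  · have hnil : s.drop i = [] := List.drop_eq_nil_of_le (by omega)
    rw [pvALoop, if_neg h, hnil]
    simp [pvBLoop]
termination_by s.length - i

-- ===== VERDICT (by name: the statement is the Claim_ definition above) =====
theorem split_into_bigrams_spec : Claim_equal_split_into_bigrams := by
  intro text _
  unfold Spec_split_into_bigrams split_into_bigrams split_into_bigrams_alt
  simpa using pvALoop_eq_pvBLoop_drop text.toList 0
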